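-- pv_equiv track=rewrite | github.com/sruthi2498/GoGamePlayer | my_playerStage2.py | getFirstOrderLibertyCount
-- ===== SOURCE A (Python) =====
-- boardSize = 5
--
-- def getNeighbourPositions(i,j):
--     neighbors = []
--     if i > 0: neighbors.append((i-1, j))
--     if i < boardSize - 1: neighbors.append((i+1, j))
--     if j > 0: neighbors.append((i, j-1))
--     if j < boardSize - 1: neighbors.append((i, j+1))
--     return neighbors
--
-- def getPositionsOfPiece(board,piece_type):
--     my_piece_locs = []
--     n = len(board)
--     for i in range(n):
--         for j in range(n):
--             if board[i][j] == piece_type: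
--                 my_piece_locs.append([i,j])
--     return my_piece_locs
--
-- def getFirstOrderLibertyCount(board,piece_type):
--     locs = getPositionsOfPiece(board,piece_type)
--     totalLiberty = 0
--     marked=[]
--     for i,j in locs:
--         neighbs = getNeighbourPositions(i,j)
--         for k,l in neighbs:
--             if board[k][l]==0:
--                 neighb_string = str(k)+"_"+str(l)
--                 if neighb_string not in marked:
--                     totalLiberty+=1
--                     marked.append(neighb_string)
--     return totalLiberty
-- ===== SOURCE B (Python) =====
-- boardSize = 5
--
-- def getNeighbourPositions(i, j):
--     neighbors = []
--     if i > 0: neighbors.append((i-1, j))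
--     if i < boardSize - 1: neighbors.append((i+1, j))
--     if j > 0: neighbors.append((i, j-1))
--     if j < boardSize - 1: neighbors.append((i, j+1))
--     return neighbors
--
-- def getFirstOrderLibertyCount(board, piece_type):
--     n = len(board)
--     adjacent = set()
--     for i in range(n):
--         for j in range(n):
--             if board[i][j] == piece_type:
--                 adjacent.update(getNeighbourPositions(i, j))
--     return sum(1 for k in range(n) for l in range(n)
--                if board[k][l] == 0 and (k, l) in adjacent)
-- ===== Notes on version B (the rewrite author's own statement) =====
-- stated objective: alternative
-- what changed: B replaces A's piece-location pass with incremental dedup through a string-keyed 'marked' list by two passes: first build a set of all cells adjacent to a piece, then scan the n-by-n grid once counting empty cells in that set; Pre_ admits boards whose rows are at least n long and whose pieces' fixed-boardSize-5 neighbours stay inside the n-by-n grid (outside it A raises IndexError or, on ragged rows longer than n, counts cells beyond the grid, a corner where the intended square board is ill-formed).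
-- outside the precondition, e.g. on getFirstOrderLibertyCount([[0, 1, 0], [0, 0, 0]], 1): A returns 3, B returns 2
import Mathlib
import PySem

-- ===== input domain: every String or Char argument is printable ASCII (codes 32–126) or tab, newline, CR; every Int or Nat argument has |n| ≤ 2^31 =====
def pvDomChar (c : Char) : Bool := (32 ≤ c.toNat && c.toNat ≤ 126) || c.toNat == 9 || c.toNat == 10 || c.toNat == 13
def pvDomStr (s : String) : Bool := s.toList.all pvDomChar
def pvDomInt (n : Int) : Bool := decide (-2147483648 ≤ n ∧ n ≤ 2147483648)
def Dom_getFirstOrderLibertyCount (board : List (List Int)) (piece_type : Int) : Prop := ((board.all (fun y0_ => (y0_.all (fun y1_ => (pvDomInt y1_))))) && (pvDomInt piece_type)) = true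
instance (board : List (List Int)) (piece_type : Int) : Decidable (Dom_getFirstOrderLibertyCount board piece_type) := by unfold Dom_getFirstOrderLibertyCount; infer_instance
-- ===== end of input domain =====

-- B replaces A's incremental dedup through a string-keyed 'marked' list by two passes: build the
-- set of cells adjacent to a piece, then scan the grid counting empty cells in it (objective: alternative).

-- ===== PORT A =====
-- boardSize = 5 (module constant)
def pvBoardSize : Int := 5

-- board[i][j] as an Option (none exactly where Python raises IndexError); used by both ports
def pvAt (board : List (List Int)) (i j : Int) : Option Int :=
  (PySem.List.pyGet? board i).bind fun row => PySem.List.pyGet? row j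

def getNeighbourPositions (i j : Int) : List (Int × Int) :=
  let neighbors : List (Int × Int) := []
  let neighbors := if i > 0 then neighbors ++ [(i - 1, j)] else neighbors
  let neighbors := if i < pvBoardSize - 1 then neighbors ++ [(i + 1, j)] else neighbors
  let neighbors := if j > 0 then neighbors ++ [(i, j - 1)] else neighbors
  let neighbors := if j < pvBoardSize - 1 then neighbors ++ [(i, j + 1)] else neighbors
  neighbors

def getPositionsOfPiece (board : List (List Int)) (piece_type : Int) : List (Int × Int) :=
  let n : Int := (board.length : Int)
  (PySem.List.pyRange 0 n 1).foldl (fun acc i =>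
    (PySem.List.pyRange 0 n 1).foldl (fun acc2 j =>
      if pvAt board i j == some piece_type then acc2 ++ [(i, j)] else acc2) acc) []

def getFirstOrderLibertyCount (board : List (List Int)) (piece_type : Int) : Int :=
  let locs := getPositionsOfPiece board piece_type
  (locs.foldl (fun (st : Int × List String) ij =>
    (getNeighbourPositions ij.1 ij.2).foldl (fun st kl =>
      if pvAt board kl.1 kl.2 == some 0 then
        if (PySem.Int.toStr kl.1 ++ "_" ++ PySem.Int.toStr kl.2) ∈ st.2 then st
        else (st.1 + 1, st.2 ++ [PySem.Int.toStr kl.1 ++ "_" ++ PySem.Int.toStr kl.2])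
      else st) st) ((0 : Int), ([] : List String))).1

-- ===== PORT B =====
def getFirstOrderLibertyCount_alt (board : List (List Int)) (piece_type : Int) : Int :=
  let n : Int := (board.length : Int)
  let adjacent : PySem.Set (Int × Int) :=
    (PySem.List.pyRange 0 n 1).foldl (fun adj i =>
      (PySem.List.pyRange 0 n 1).foldl (fun adj j =>
        if pvAt board i j == some piece_type then
          PySem.Set.update adj (getNeighbourPositions i j)
        else adj) adj) PySem.Set.empty
  (PySem.List.pyRange 0 n 1).foldl (fun cnt k =>
    (PySem.List.pyRange 0 n 1).foldl (fun cnt l =>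
      if pvAt board k l == some 0 && decide ((k, l) ∈ adjacent) then cnt + 1 else cnt) cnt) 0

-- ===== PRECONDITION & SPEC =====
-- Pre_ admits boards whose rows all have length ≥ n = len(board) and whose pieces' fixed-boardSize-5
-- neighbours stay inside the n×n grid: outside it A either raises IndexError, or — only on ragged
-- boards whose rows extend past the n×n grid — returns a count that includes cells beyond the grid,
-- a corner where the intended n×n board is ill-formed and either count is defensible.
def Pre_getFirstOrderLibertyCount (board : List (List Int)) (piece_type : Int) : Prop :=
  (∀ row ∈ board, board.length ≤ row.length) ∧
  ∀ i < board.length, ∀ j < board.length,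
    ((board[i]?.getD [])[j]? = some piece_type →
      (i < 4 → i + 1 < board.length) ∧ (j < 4 → j + 1 < board.length))
instance (board : List (List Int)) (piece_type : Int) : Decidable (Pre_getFirstOrderLibertyCount board piece_type) := by unfold Pre_getFirstOrderLibertyCount; infer_instance

def pvWitness_getFirstOrderLibertyCount : List (List Int) × Int :=
  ([[0,0,0,0,0],[0,1,0,0,0],[0,0,2,0,0],[0,0,1,0,0],[0,0,0,0,0]], 1)

def Spec_getFirstOrderLibertyCount (board : List (List Int)) (piece_type : Int) (out : Int) : Prop := out = getFirstOrderLibertyCount_alt board piece_type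
instance (board : List (List Int)) (piece_type : Int) (out : Int) : Decidable (Spec_getFirstOrderLibertyCount board piece_type out) := by unfold Spec_getFirstOrderLibertyCount; infer_instance

-- ===== CLAIM (what is proved, stated in full; the proofs are below) =====
def Claim_equal_getFirstOrderLibertyCount : Prop := ∀ (board : List (List Int)) (piece_type : Int), Dom_getFirstOrderLibertyCount board piece_type → Pre_getFirstOrderLibertyCount board piece_type → Spec_getFirstOrderLibertyCount board piece_type (getFirstOrderLibertyCount board piece_type)

-- ===== LEMMAS AND PROOFS =====

-- ---- decimal strings: Nat.toDigits 10 produces digit characters and is injective ----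

lemma pv_tdc_succ (f n : Nat) (ds : List Char) :
    Nat.toDigitsCore 10 (f + 1) n ds
      = if n / 10 = 0 then (n % 10).digitChar :: ds
        else Nat.toDigitsCore 10 f (n / 10) ((n % 10).digitChar :: ds) := by
  rfl

lemma pv_tdc_append (f : Nat) : ∀ (n : Nat) (ds : List Char), n < f →
    Nat.toDigitsCore 10 f n ds = Nat.toDigitsCore 10 f n [] ++ ds := by
  induction f with
  | zero => intro n ds h; omega
  | succ f ih =>
    intro n ds h
    rw [pv_tdc_succ, pv_tdc_succ]
    by_cases h0 : n / 10 = 0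
    · simp [h0]
    · simp only [h0, if_false]
      have hlt : n / 10 < f := by omega
      rw [ih (n / 10) ((n % 10).digitChar :: ds) hlt,
          ih (n / 10) [(n % 10).digitChar] hlt]
      simp

lemma pv_digitChar_toNat (d : Nat) (h : d < 10) : d.digitChar.toNat = 48 + d := by
  interval_cases d <;> decide

lemma pv_digitChar_digit (d : Nat) (h : d < 10) :
    48 ≤ d.digitChar.toNat ∧ d.digitChar.toNat ≤ 57 := by
  rw [pv_digitChar_toNat d h]; omega

-- decoding a digit list, most significant first
def pvDec (a : Nat) (l : List Char) : Nat := l.foldl (fun a c => a * 10 + (c.toNat - 48)) a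

lemma pv_tdc_spec (f : Nat) : ∀ n, n < f →
    (∀ a, pvDec a (Nat.toDigitsCore 10 f n []) =
      a * 10 ^ (Nat.toDigitsCore 10 f n []).length + n) ∧
    (∀ c ∈ Nat.toDigitsCore 10 f n [], 48 ≤ c.toNat ∧ c.toNat ≤ 57) := by
  induction f with
  | zero => intro n h; omega
  | succ f ih =>
    intro n h
    rw [pv_tdc_succ]
    by_cases h0 : n / 10 = 0
    · have hn : n < 10 := by omega
      simp only [h0, if_true]
      constructor
      · intro a
        simp only [pvDec, List.foldl_cons, List.foldl_nil, List.length_cons,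
          List.length_nil, pow_succ, pow_zero, Nat.mod_eq_of_lt hn,
          pv_digitChar_toNat n hn]
        omega
      · intro c hc
        rcases List.mem_singleton.mp hc with rfl
        exact pv_digitChar_digit _ (by omega)
    · simp only [h0, if_false]
      have hlt : n / 10 < f := by omega
      rw [pv_tdc_append f (n / 10) _ hlt]
      rcases ih (n / 10) hlt with ⟨hdec, hdig⟩
      constructor
      · intro a
        have : pvDec a (Nat.toDigitsCore 10 f (n / 10) [] ++ [(n % 10).digitChar])
            = pvDec (pvDec a (Nat.toDigitsCore 10 f (n / 10) [])) [(n % 10).digitChar] := by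
          simp [pvDec, List.foldl_append]
        rw [this, hdec a]
        simp only [pvDec, List.foldl_cons, List.foldl_nil,
          pv_digitChar_toNat (n % 10) (by omega)]
        rw [List.length_append]
        simp only [List.length_singleton, pow_succ]
        have h48 : 48 + n % 10 - 48 = n % 10 := by omega
        rw [h48]
        have := Nat.div_add_mod n 10
        ring_nf
        omega
      · intro c hc
        rcases List.mem_append.mp hc with hc | hc
        · exact hdig c hc
        · rcases List.mem_singleton.mp hc with rfl
          exact pv_digitChar_digit _ (by omega)

lemma pv_toDigits_dec (n : Nat) : pvDec 0 (Nat.toDigits 10 n) = n := by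
  have := ((pv_tdc_spec (n + 1) n (by omega)).1) 0
  simpa [Nat.toDigits] using this

lemma pv_toDigits_digit (n : Nat) : ∀ c ∈ Nat.toDigits 10 n, 48 ≤ c.toNat ∧ c.toNat ≤ 57 :=
  (pv_tdc_spec (n + 1) n (by omega)).2

-- splitting a digits ++ '_' ++ digits list is unambiguous
lemma pv_split (A : List Char) : ∀ (B C D : List Char),
    (∀ c ∈ A, c ≠ '_') → (∀ c ∈ B, c ≠ '_') →
    A ++ '_' :: C = B ++ '_' :: D → A = B ∧ C = D := by
  induction A with
  | nil =>
    intro B C D _ hB h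
    cases B with
    | nil => simpa using h
    | cons b bs =>
      simp only [List.nil_append, List.cons_append, List.cons.injEq] at h
      exact absurd h.1.symm (hB b (by simp))
  | cons a as ih =>
    intro B C D hA hB h
    cases B with
    | nil =>
      simp only [List.cons_append, List.nil_append, List.cons.injEq] at h
      exact absurd h.1 (hA a (by simp))
    | cons b bs =>
      simp only [List.cons_append, List.cons.injEq] at h
      rcases h with ⟨rfl, h2⟩
      rcases ih bs C D (fun c hc => hA c (by simp [hc])) (fun c hc => hB c (by simp [hc])) h2
        with ⟨rfl, rfl⟩
      exact ⟨rfl, rfl⟩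

-- the key string "k_l" used by A's marked list
def pvKey (c : Int × Int) : String := PySem.Int.toStr c.1 ++ "_" ++ PySem.Int.toStr c.2

lemma pv_toChars_nonneg (a : Int) (ha : 0 ≤ a) :
    PySem.Int.toChars a = Nat.toDigits 10 a.toNat := by
  simp [PySem.Int.toChars, not_lt.mpr ha]

lemma pvKey_inj (a b : Int × Int) (ha1 : 0 ≤ a.1) (ha2 : 0 ≤ a.2) (hb1 : 0 ≤ b.1)
    (hb2 : 0 ≤ b.2) (h : pvKey a = pvKey b) : a = b := by
  have h' := congrArg String.toList h
  simp only [pvKey, String.toList_append, PySem.Int.toList_toStr] at h'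
  rw [pv_toChars_nonneg _ ha1, pv_toChars_nonneg _ ha2, pv_toChars_nonneg _ hb1,
    pv_toChars_nonneg _ hb2] at h'
  have hus : ("_" : String).toList = ['_'] := by decide
  rw [hus] at h'
  have hsplit := pv_split (Nat.toDigits 10 a.1.toNat) (Nat.toDigits 10 b.1.toNat)
    (Nat.toDigits 10 a.2.toNat) (Nat.toDigits 10 b.2.toNat)
    (fun c hc => by have := pv_toDigits_digit _ c hc; intro heq; subst heq; revert this; decide)
    (fun c hc => by have := pv_toDigits_digit _ c hc; intro heq; subst heq; revert this; decide)
    (by simpa using h')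
  have e1 : a.1.toNat = b.1.toNat := by rw [← pv_toDigits_dec a.1.toNat, ← pv_toDigits_dec b.1.toNat, hsplit.1]
  have e2 : a.2.toNat = b.2.toNat := by rw [← pv_toDigits_dec a.2.toNat, ← pv_toDigits_dec b.2.toNat, hsplit.2]
  have : a.1 = b.1 ∧ a.2 = b.2 := ⟨by omega, by omega⟩
  exact Prod.ext this.1 this.2

-- ---- generic shapes of the two loops ----

-- first-occurrence insertion of keys, the shape of A's marked list
def pvIns (m : List String) (ks : List String) : List String :=
  ks.foldl (fun m s => if s ∈ m then m else m ++ [s]) m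

-- the state invariant of A's marked-list loop
lemma pv_foldA (e : Int × Int → Bool) (κ : Int × Int → String) :
    ∀ (ns : List (Int × Int)) (t : Int) (m : List String),
    ns.foldl (fun (st : Int × List String) c =>
        if e c then (if κ c ∈ st.2 then st else (st.1 + 1, st.2 ++ [κ c])) else st) (t, m)
      = (t + ((pvIns m ((ns.filter e).map κ)).length : Int) - (m.length : Int),
         pvIns m ((ns.filter e).map κ)) := by
  intro ns
  induction ns with
  | nil => intro t m; simp [pvIns]
  | cons c rest ih =>
    intro t m
    simp only [List.foldl_cons, List.filter_cons]
    by_cases he : e c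
    · simp only [he, if_pos, List.map_cons]
      by_cases hm : κ c ∈ m
      · have h1 : pvIns m (κ c :: (rest.filter e).map κ) = pvIns m ((rest.filter e).map κ) := by
          simp [pvIns, hm]
        rw [if_pos hm, h1, ih]
      · have hIns : pvIns m (κ c :: (rest.filter e).map κ)
            = pvIns (m ++ [κ c]) ((rest.filter e).map κ) := by
          simp [pvIns, hm]
        rw [if_neg hm, hIns, ih, Prod.mk.injEq]
        refine ⟨?_, rfl⟩
        push_cast [List.length_append, List.length_cons, List.length_nil]
        ring
    · rw [if_neg (by simp [he]), ih]
      simp [he]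

lemma pvIns_nodup : ∀ (ks m : List String), m.Nodup → (pvIns m ks).Nodup := by
  intro ks
  induction ks with
  | nil => intro m hm; simpa [pvIns] using hm
  | cons s rest ih =>
    intro m hm
    by_cases hs : s ∈ m
    · simpa [pvIns, hs] using ih m hm
    · have hnd : (m ++ [s]).Nodup := by
        rw [List.nodup_append]
        exact ⟨hm, List.nodup_singleton s, fun a ha b hb hab =>
          hs ((List.mem_singleton.mp hb ▸ hab) ▸ ha)⟩
      simpa [pvIns, hs] using ih (m ++ [s]) hnd

lemma pvIns_toFinset : ∀ (ks m : List String),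
    (pvIns m ks).toFinset = m.toFinset ∪ ks.toFinset := by
  intro ks
  induction ks with
  | nil => intro m; simp [pvIns]
  | cons s rest ih =>
    intro m
    by_cases hs : s ∈ m
    · have h1 : pvIns m (s :: rest) = pvIns m rest := by simp [pvIns, hs]
      rw [h1, ih]
      ext x
      simp only [Finset.mem_union, List.mem_toFinset, List.mem_cons]
      constructor
      · rintro (h | h) <;> tauto
      · rintro (h | rfl | h) <;> tauto
    · have h1 : pvIns m (s :: rest) = pvIns (m ++ [s]) rest := by simp [pvIns, hs]
      rw [h1, ih]
      ext x
      simp only [Finset.mem_union, List.mem_toFinset, List.mem_append, List.mem_cons]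
      tauto

lemma pv_toFinset_map {α β : Type} [DecidableEq α] [DecidableEq β] (l : List α) (f : α → β) :
    (l.map f).toFinset = l.toFinset.image f := by
  ext x; simp [List.mem_map]

-- ---- characterisations of the two ports ----

-- the n×n grid both ports scan, row-major
def pvCellsA (board : List (List Int)) : List (Int × Int) :=
  (PySem.List.pyRange 0 (board.length : Int) 1).flatMap (fun i =>
    (PySem.List.pyRange 0 (board.length : Int) 1).map (fun j => (i, j)))

-- B's first pass: the set of cells adjacent to a piece
def pvAdj (board : List (List Int)) (piece_type : Int) : PySem.Set (Int × Int) :=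
  (pvCellsA board).foldl (fun adj p =>
    if pvAt board p.1 p.2 == some piece_type then
      PySem.Set.update adj (getNeighbourPositions p.1 p.2)
    else adj) PySem.Set.empty

-- A's positions-of-piece scan is a filter of the grid
lemma pv_locs (board : List (List Int)) (piece_type : Int) :
    getPositionsOfPiece board piece_type
      = (pvCellsA board).filter (fun c => pvAt board c.1 c.2 == some piece_type) := by
  show (PySem.List.pyRange 0 (board.length : Int) 1).foldl (fun acc i =>
      (PySem.List.pyRange 0 (board.length : Int) 1).foldl (fun acc2 j =>
        if pvAt board i j == some piece_type then acc2 ++ [(i, j)] else acc2) acc) []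
    = (pvCellsA board).filter (fun c => pvAt board c.1 c.2 == some piece_type)
  have hinner : ∀ (acc : List (Int × Int)), ∀ i ∈ PySem.List.pyRange 0 (board.length : Int) 1,
      (PySem.List.pyRange 0 (board.length : Int) 1).foldl (fun acc2 j =>
        if pvAt board i j == some piece_type then acc2 ++ [(i, j)] else acc2) acc
      = acc ++ ((PySem.List.pyRange 0 (board.length : Int) 1).map (fun j => (i, j))).filter
          (fun c => pvAt board c.1 c.2 == some piece_type) := by
    intro acc i _
    rw [PySem.List.foldl_append_if (fun j => pvAt board i j == some piece_type) (fun j => (i, j))]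
    rw [List.filter_map]
    rfl
  rw [PySem.List.foldl_congr_mem _ _ _ _ hinner]
  rw [PySem.List.foldl_append_eq_flatMap, List.nil_append, pvCellsA, List.filter_flatMap]

-- counting characterisation of A: distinct keys of empty neighbours of pieces
lemma pv_A_card (board : List (List Int)) (piece_type : Int) :
    getFirstOrderLibertyCount board piece_type
      = (((((getPositionsOfPiece board piece_type).flatMap
            (fun ij => getNeighbourPositions ij.1 ij.2)).filter
            (fun c => pvAt board c.1 c.2 == some 0)).map pvKey).toFinset.card : Int) := by
  show ((getPositionsOfPiece board piece_type).foldl (fun (st : Int × List String) ij =>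
      (getNeighbourPositions ij.1 ij.2).foldl (fun st kl =>
        if pvAt board kl.1 kl.2 == some 0 then
          if (PySem.Int.toStr kl.1 ++ "_" ++ PySem.Int.toStr kl.2) ∈ st.2 then st
          else (st.1 + 1, st.2 ++ [PySem.Int.toStr kl.1 ++ "_" ++ PySem.Int.toStr kl.2])
        else st) st) ((0 : Int), ([] : List String))).1 = _
  rw [← List.foldl_flatMap]
  have := pv_foldA (fun c => pvAt board c.1 c.2 == some 0) pvKey
    ((getPositionsOfPiece board piece_type).flatMap (fun ij => getNeighbourPositions ij.1 ij.2))
    0 []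
  rw [show (fun (st : Int × List String) (kl : Int × Int) =>
        if pvAt board kl.1 kl.2 == some 0 then
          if (PySem.Int.toStr kl.1 ++ "_" ++ PySem.Int.toStr kl.2) ∈ st.2 then st
          else (st.1 + 1, st.2 ++ [PySem.Int.toStr kl.1 ++ "_" ++ PySem.Int.toStr kl.2])
        else st)
      = (fun (st : Int × List String) (c : Int × Int) =>
        if (fun c => pvAt board c.1 c.2 == some 0) c then
          (if pvKey c ∈ st.2 then st else (st.1 + 1, st.2 ++ [pvKey c])) else st) from rfl, this]
  simp only [zero_add, List.length_nil, Nat.cast_zero, sub_zero]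
  have hnd := pvIns_nodup
    ((((getPositionsOfPiece board piece_type).flatMap
        (fun ij => getNeighbourPositions ij.1 ij.2)).filter
        (fun c => pvAt board c.1 c.2 == some 0)).map pvKey) [] (by simp)
  rw [← List.toFinset_card_of_nodup hnd, pvIns_toFinset]
  simp

-- membership in B's adjacency set
lemma pv_mem_foldl_update (e : Int × Int → Bool) (N : Int × Int → List (Int × Int)) :
    ∀ (ps : List (Int × Int)) (s : PySem.Set (Int × Int)) (x : Int × Int),
      x ∈ ps.foldl (fun adj p => if e p then PySem.Set.update adj (N p) else adj) s
        ↔ x ∈ s ∨ ∃ p ∈ ps, e p = true ∧ x ∈ N p := by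
  intro ps
  induction ps with
  | nil => intro s x; simp
  | cons p rest ih =>
    intro s x
    simp only [List.foldl_cons]
    by_cases hp : e p
    · rw [if_pos hp, ih, PySem.Set.mem_update]
      constructor
      · rintro ((h | h) | ⟨q, hq, hqe, hqx⟩)
        · exact Or.inl h
        · exact Or.inr ⟨p, by simp, hp, h⟩
        · exact Or.inr ⟨q, by simp [hq], hqe, hqx⟩
      · rintro (h | ⟨q, hq, hqe, hqx⟩)
        · exact Or.inl (Or.inl h)
        · rcases List.mem_cons.mp hq with rfl | hq
          · exact Or.inl (Or.inr hqx)
          · exact Or.inr ⟨q, hq, hqe, hqx⟩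
    · rw [if_neg hp, ih]
      constructor
      · rintro (h | ⟨q, hq, hqe, hqx⟩)
        · exact Or.inl h
        · exact Or.inr ⟨q, by simp [hq], hqe, hqx⟩
      · rintro (h | ⟨q, hq, hqe, hqx⟩)
        · exact Or.inl h
        · rcases List.mem_cons.mp hq with rfl | hq
          · exact absurd hqe (by simp [hp])
          · exact Or.inr ⟨q, hq, hqe, hqx⟩

lemma pv_mem_adj (board : List (List Int)) (piece_type : Int) (x : Int × Int) :
    x ∈ pvAdj board piece_type
      ↔ ∃ p ∈ pvCellsA board,
          (pvAt board p.1 p.2 == some piece_type) = true ∧ x ∈ getNeighbourPositions p.1 p.2 := by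
  rw [pvAdj, pv_mem_foldl_update]
  simp [PySem.Set.empty]

-- the adjacency set of B's port is pvAdj
lemma pv_adj_eq (board : List (List Int)) (piece_type : Int) :
    (PySem.List.pyRange 0 (board.length : Int) 1).foldl (fun adj i =>
      (PySem.List.pyRange 0 (board.length : Int) 1).foldl (fun adj j =>
        if pvAt board i j == some piece_type then
          PySem.Set.update adj (getNeighbourPositions i j)
        else adj) adj) PySem.Set.empty = pvAdj board piece_type := by
  rw [pvAdj, pvCellsA, List.foldl_flatMap]
  refine PySem.List.foldl_congr_mem _ _ _ _ ?_
  intro adj i _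
  rw [List.foldl_map]

-- counting characterisation of B: one pass over the grid against the adjacency set
lemma pv_B_count (board : List (List Int)) (piece_type : Int) :
    getFirstOrderLibertyCount_alt board piece_type
      = (((pvCellsA board).filter (fun c =>
          pvAt board c.1 c.2 == some 0 && decide (c ∈ pvAdj board piece_type))).length : Int) := by
  show (PySem.List.pyRange 0 (board.length : Int) 1).foldl (fun cnt k =>
      (PySem.List.pyRange 0 (board.length : Int) 1).foldl (fun cnt l =>
        if pvAt board k l == some 0 && decide ((k, l) ∈
            (PySem.List.pyRange 0 (board.length : Int) 1).foldl (fun adj i =>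
              (PySem.List.pyRange 0 (board.length : Int) 1).foldl (fun adj j =>
                if pvAt board i j == some piece_type then
                  PySem.Set.update adj (getNeighbourPositions i j)
                else adj) adj) PySem.Set.empty) then cnt + 1 else cnt) cnt) 0 = _
  rw [pv_adj_eq board piece_type]
  have hinner : ∀ (cnt : Int), ∀ k ∈ PySem.List.pyRange 0 (board.length : Int) 1,
      (PySem.List.pyRange 0 (board.length : Int) 1).foldl (fun cnt l =>
        if pvAt board k l == some 0 && decide ((k, l) ∈ pvAdj board piece_type)
        then cnt + 1 else cnt) cnt
      = ((PySem.List.pyRange 0 (board.length : Int) 1).map (fun l => (k, l))).foldl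
          (fun cnt c =>
            if pvAt board c.1 c.2 == some 0 && decide (c ∈ pvAdj board piece_type)
            then cnt + 1 else cnt) cnt := by
    intro cnt k _
    rw [List.foldl_map]
  rw [PySem.List.foldl_congr_mem _ _ _ _ hinner, ← List.foldl_flatMap]
  rw [show (PySem.List.pyRange 0 (board.length : Int) 1).flatMap (fun k =>
      (PySem.List.pyRange 0 (board.length : Int) 1).map (fun l => (k, l))) = pvCellsA board
    from rfl]
  rw [PySem.List.foldl_count_if, List.countP_eq_length_filter, zero_add]

-- ---- membership facts ----

lemma pv_mem_cellsA (board : List (List Int)) (c : Int × Int) :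
    c ∈ pvCellsA board ↔
      0 ≤ c.1 ∧ c.1 < (board.length : Int) ∧ 0 ≤ c.2 ∧ c.2 < (board.length : Int) := by
  rcases c with ⟨x, y⟩
  simp only [pvCellsA, List.mem_flatMap, List.mem_map, PySem.List.mem_pyRange_one,
    Prod.mk.injEq]
  constructor
  · rintro ⟨i, ⟨hi0, hin⟩, j, ⟨hj0, hjn⟩, rfl, rfl⟩
    exact ⟨hi0, hin, hj0, hjn⟩
  · rintro ⟨h1, h2, h3, h4⟩
    exact ⟨x, ⟨h1, h2⟩, y, ⟨h3, h4⟩, rfl, rfl⟩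

lemma pv_mem_ite_app {c : Prop} [Decidable c] (l : List (Int × Int)) (e d : Int × Int) :
    (d ∈ (if c then l ++ [e] else l)) ↔ d ∈ l ∨ (c ∧ d = e) := by
  split_ifs with h <;> simp [h]

lemma pv_mem_N (i j : Int) (d : Int × Int) :
    d ∈ getNeighbourPositions i j ↔
      (0 < i ∧ d = (i - 1, j)) ∨ (i < 4 ∧ d = (i + 1, j)) ∨
      (0 < j ∧ d = (i, j - 1)) ∨ (j < 4 ∧ d = (i, j + 1)) := by
  show d ∈ (let neighbors : List (Int × Int) := []
    let neighbors := if i > 0 then neighbors ++ [(i - 1, j)] else neighbors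
    let neighbors := if i < pvBoardSize - 1 then neighbors ++ [(i + 1, j)] else neighbors
    let neighbors := if j > 0 then neighbors ++ [(i, j - 1)] else neighbors
    let neighbors := if j < pvBoardSize - 1 then neighbors ++ [(i, j + 1)] else neighbors
    neighbors) ↔ _
  simp only []
  rw [pv_mem_ite_app, pv_mem_ite_app, pv_mem_ite_app, pv_mem_ite_app]
  simp only [List.not_mem_nil, false_or, gt_iff_lt,
    show (pvBoardSize - 1 : Int) = 4 from by norm_num [pvBoardSize]]
  tauto

lemma pv_at_nat (board : List (List Int)) (i j : Int) (hi : 0 ≤ i) (hj : 0 ≤ j) :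
    pvAt board i j = (board[i.toNat]?.getD [])[j.toNat]? := by
  rw [pvAt, PySem.List.pyGet?_of_nonneg board hi]
  cases h : board[i.toNat]? with
  | none => simp [PySem.List.pyGet?_of_nonneg _ hj]
  | some row => simp [PySem.List.pyGet?_of_nonneg _ hj]

-- the two counted sets coincide under the precondition
lemma pv_sets_eq (board : List (List Int)) (piece_type : Int)
    (h2 : ∀ i < board.length, ∀ j < board.length,
      ((board[i]?.getD [])[j]? = some piece_type →
        (i < 4 → i + 1 < board.length) ∧ (j < 4 → j + 1 < board.length))) :
    (((getPositionsOfPiece board piece_type).flatMap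
        (fun ij => getNeighbourPositions ij.1 ij.2)).filter
        (fun c => pvAt board c.1 c.2 == some 0)).toFinset
      = ((pvCellsA board).filter (fun c =>
          pvAt board c.1 c.2 == some 0 && decide (c ∈ pvAdj board piece_type))).toFinset := by
  ext x
  simp only [List.mem_toFinset, List.mem_filter, List.mem_flatMap, Bool.and_eq_true,
    decide_eq_true_eq]
  rw [pv_locs board piece_type, pv_mem_adj board piece_type x]
  constructor
  · rintro ⟨⟨p, hp, hxp⟩, hx0⟩
    rcases List.mem_filter.mp hp with ⟨hpA, hpP⟩
    rcases (pv_mem_cellsA board p).mp hpA with ⟨hp10, hp1n, hp20, hp2n⟩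
    have hiN : p.1.toNat < board.length := by omega
    have hjN : p.2.toNat < board.length := by omega
    have hpiece : (board[p.1.toNat]?.getD [])[p.2.toNat]? = some piece_type := by
      rw [← pv_at_nat board p.1 p.2 hp10 hp20]
      exact eq_of_beq hpP
    have hpre := h2 p.1.toNat hiN p.2.toNat hjN hpiece
    refine ⟨?_, hx0, p, hp |> List.mem_of_mem_filter, hpP, hxp⟩
    rcases (pv_mem_N p.1 p.2 x).mp hxp with ⟨hg, rfl⟩ | ⟨hg, rfl⟩ | ⟨hg, rfl⟩ | ⟨hg, rfl⟩
    · exact (pv_mem_cellsA board _).mpr ⟨by simp; omega, by simp; omega, hp20, hp2n⟩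
    · have : p.1.toNat + 1 < board.length := hpre.1 (by omega)
      exact (pv_mem_cellsA board _).mpr ⟨by simp; omega, by simp; omega, hp20, hp2n⟩
    · exact (pv_mem_cellsA board _).mpr ⟨hp10, hp1n, by simp; omega, by simp; omega⟩
    · have : p.2.toNat + 1 < board.length := hpre.2 (by omega)
      exact (pv_mem_cellsA board _).mpr ⟨hp10, hp1n, by simp; omega, by simp; omega⟩
  · rintro ⟨hxA, hx0, p, hpA, hpP, hxp⟩
    exact ⟨⟨p, List.mem_filter.mpr ⟨hpA, hpP⟩, hxp⟩, hx0⟩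

-- every cell A counts has nonnegative coordinates
lemma pv_ns_nonneg (board : List (List Int)) (piece_type : Int) :
    ∀ c ∈ (getPositionsOfPiece board piece_type).flatMap
        (fun ij => getNeighbourPositions ij.1 ij.2), 0 ≤ c.1 ∧ 0 ≤ c.2 := by
  intro c hc
  rcases List.mem_flatMap.mp hc with ⟨p, hp, hcp⟩
  rw [pv_locs board piece_type] at hp
  rcases (pv_mem_cellsA board p).mp (List.mem_of_mem_filter hp) with ⟨hp10, _, hp20, _⟩
  rcases (pv_mem_N p.1 p.2 c).mp hcp with ⟨h, rfl⟩ | ⟨h, rfl⟩ | ⟨h, rfl⟩ | ⟨h, rfl⟩ <;>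
    constructor <;> simp <;> omega

lemma pv_cellsA_nodup (board : List (List Int)) : (pvCellsA board).Nodup := by
  rw [pvCellsA, List.nodup_flatMap]
  constructor
  · intro k _
    exact (PySem.List.nodup_pyRange_one _ _).map (fun a b h => by
      simpa using congrArg Prod.snd h)
  · have hlt := PySem.List.pairwise_lt_pyRange_one 0 ((board.length : Int))
    exact hlt.imp (fun hab => by
      intro c hc hc2
      rcases List.mem_map.mp hc with ⟨l, _, rfl⟩
      rcases List.mem_map.mp hc2 with ⟨l', _, he⟩
      have := congrArg Prod.fst he
      simp at this
      omega)

-- ===== VERDICT (by name: the statement is the Claim_ definition above) =====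
theorem getFirstOrderLibertyCount_spec : Claim_equal_getFirstOrderLibertyCount := by
  intro board piece_type _ hpre
  rcases hpre with ⟨_, h2⟩
  unfold Spec_getFirstOrderLibertyCount
  have hnn := pv_ns_nonneg board piece_type
  have hinj : Set.InjOn pvKey ((((getPositionsOfPiece board piece_type).flatMap
      (fun ij => getNeighbourPositions ij.1 ij.2)).filter
      (fun c => pvAt board c.1 c.2 == some 0)).toFinset : Finset (Int × Int)) := by
    intro a ha b hb hab
    rw [Finset.mem_coe, List.mem_toFinset] at ha hb
    rcases hnn a (List.mem_of_mem_filter ha) with ⟨ha1, ha2⟩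
    rcases hnn b (List.mem_of_mem_filter hb) with ⟨hb1, hb2⟩
    exact pvKey_inj a b ha1 ha2 hb1 hb2 hab
  rw [pv_A_card board piece_type, pv_B_count board piece_type,
    pv_toFinset_map, Finset.card_image_of_injOn hinj, pv_sets_eq board piece_type h2,
    List.toFinset_card_of_nodup ((pv_cellsA_nodup board).filter _)]
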